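-- pv_equiv track=rewrite | github.com/manwar/perlweeklychallenge-club | challenge-244/jeanluc2020/python/ch-2.py | min_max_squared
-- ===== SOURCE A (Python) =====
-- def min_max_squared(nums: list) -> float:
--     elems = len(nums)
--     if elems == 0:
--         return 0
--     min = nums[0]
--     max = nums[0]
--     for elem in nums:
--         if elem > max:
--             max = elem
--         if elem < min:
--             min = elem
--     return min * max * max
-- ===== SOURCE B (Python) =====
-- def min_max_squared(nums: list) -> float:
--     if len(nums) == 0:
--         return 0
--     s = sorted(nums)
--     return s[0] * s[-1] * s[-1]
-- ===== Notes on version B (the rewrite author's own statement) =====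
-- stated objective: alternative
-- what changed: Replaces A's single-pass min/max tracking loop with a sort-then-index strategy: B sorts a copy and takes the first element (min) and last element (max).
import Mathlib
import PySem

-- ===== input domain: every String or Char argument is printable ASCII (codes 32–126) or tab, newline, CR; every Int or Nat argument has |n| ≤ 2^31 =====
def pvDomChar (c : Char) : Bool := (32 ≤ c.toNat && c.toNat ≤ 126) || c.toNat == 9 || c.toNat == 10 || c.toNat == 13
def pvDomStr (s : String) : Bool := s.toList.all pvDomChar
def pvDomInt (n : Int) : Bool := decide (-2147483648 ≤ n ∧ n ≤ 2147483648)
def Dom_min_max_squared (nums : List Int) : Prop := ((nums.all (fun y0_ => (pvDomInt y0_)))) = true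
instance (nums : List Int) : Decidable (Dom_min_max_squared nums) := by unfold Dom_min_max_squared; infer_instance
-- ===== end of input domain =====

-- B replaces A's single-pass min/max loop with a sort-then-index strategy (alternative decomposition; return value only).


-- ===== PORT A =====
-- literal transliteration: guard on len, then one loop tracking (min, max), updating max first
def min_max_squared (nums : List Int) : Int :=
  match nums with
  | [] => 0
  | a :: _ =>
    let p := nums.foldl (fun (p : Int × Int) elem =>
      let mx := if elem > p.2 then elem else p.2
      let mn := if elem < p.1 then elem else p.1
      (mn, mx)) (a, a)
    p.1 * p.2 * p.2

-- ===== PORT B =====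
-- literal transliteration of Source B: guard, sorted copy, s[0] * s[-1] * s[-1]
def min_max_squared_alt (nums : List Int) : Int :=
  match nums with
  | [] => 0
  | _ :: _ =>
    let s := PySem.List.sorted nums (fun x => x) false
    (s.headD 0) * (s.getLastD 0) * (s.getLastD 0)

-- ===== PRECONDITION & SPEC =====
def Spec_min_max_squared (nums : List Int) (out : Int) : Prop := out = min_max_squared_alt nums
instance (nums : List Int) (out : Int) : Decidable (Spec_min_max_squared nums out) := by unfold Spec_min_max_squared; infer_instance

-- ===== CLAIM (what is proved, stated in full; the proofs are below) =====
def Claim_equal_min_max_squared : Prop := ∀ (nums : List Int), Dom_min_max_squared nums → Spec_min_max_squared nums (min_max_squared nums)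

-- ===== LEMMAS AND PROOFS =====

-- A's loop computes (foldl min, foldl max)
theorem pv_fold_eq (l : List Int) : ∀ mn mx : Int,
    l.foldl (fun (p : Int × Int) elem =>
      let mx := if elem > p.2 then elem else p.2
      let mn := if elem < p.1 then elem else p.1
      (mn, mx)) (mn, mx) = (l.foldl min mn, l.foldl max mx) := by
  induction l with
  | nil => intro mn mx; rfl
  | cons b t ih =>
    intro mn mx
    simp only [List.foldl_cons]
    have h1 : (if b < mn then b else mn) = min mn b := by
      simp [min_def]; omega
    have h2 : (if b > mx then b else mx) = max mx b := by
      simp [max_def]; omega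
    rw [h1, h2]
    exact ih _ _

theorem pv_foldl_min_mem (l : List Int) : ∀ a : Int, l.foldl min a ∈ a :: l := by
  induction l with
  | nil => intro a; simp
  | cons b t ih =>
    intro a
    simp only [List.foldl_cons]
    rcases min_choice a b with h | h
    · rw [h]
      have := ih a
      simp at this ⊢
      tauto
    · rw [h]
      have := ih b
      simp at this ⊢
      tauto

theorem pv_foldl_min_le (l : List Int) : ∀ a : Int, l.foldl min a ≤ a ∧ ∀ y ∈ l, l.foldl min a ≤ y := by
  induction l with
  | nil => intro a; simp
  | cons b t ih =>
    intro a
    simp only [List.foldl_cons]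
    obtain ⟨h1, h2⟩ := ih (min a b)
    constructor
    · exact le_trans h1 (min_le_left a b)
    · intro y hy
      rcases List.mem_cons.mp hy with rfl | hy
      · exact le_trans h1 (min_le_right a y)
      · exact h2 y hy

theorem pv_foldl_max_mem (l : List Int) : ∀ a : Int, l.foldl max a ∈ a :: l := by
  induction l with
  | nil => intro a; simp
  | cons b t ih =>
    intro a
    simp only [List.foldl_cons]
    rcases max_choice a b with h | h
    · rw [h]
      have := ih a
      simp at this ⊢
      tauto
    · rw [h]
      have := ih b
      simp at this ⊢
      tauto

theorem pv_foldl_max_ge (l : List Int) : ∀ a : Int, a ≤ l.foldl max a ∧ ∀ y ∈ l, y ≤ l.foldl max a := by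
  induction l with
  | nil => intro a; simp
  | cons b t ih =>
    intro a
    simp only [List.foldl_cons]
    obtain ⟨h1, h2⟩ := ih (max a b)
    constructor
    · exact le_trans (le_max_left a b) h1
    · intro y hy
      rcases List.mem_cons.mp hy with rfl | hy
      · exact le_trans (le_max_right a y) h1
      · exact h2 y hy

theorem pv_getLastD_mem (l : List Int) (h : l ≠ []) : l.getLastD 0 ∈ l := by
  rw [List.getLastD_eq_getLast?, List.getLast?_eq_some_getLast h]
  simp [List.getLast_mem]

theorem pv_pairwise_le_getLastD (l : List Int) (hp : l.Pairwise (· ≤ ·)) :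
    ∀ y ∈ l, y ≤ l.getLastD 0 := by
  induction l with
  | nil => simp
  | cons b t ih =>
    obtain ⟨hb, ht⟩ := List.pairwise_cons.mp hp
    intro y hy
    cases t with
    | nil =>
      simp only [List.mem_singleton] at hy
      simp [hy]
    | cons c u =>
      rcases List.mem_cons.mp hy with rfl | hy
      · have hm := pv_getLastD_mem (c :: u) (by simp)
        have hble := hb _ hm
        simpa [List.getLastD] using hble
      · have := ih ht y hy
        simpa [List.getLastD] using this

-- ===== VERDICT (by name: the statement is the Claim_ definition above) =====
theorem min_max_squared_spec : Claim_equal_min_max_squared := by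
  intro nums _
  unfold Spec_min_max_squared min_max_squared min_max_squared_alt
  cases nums with
  | nil => rfl
  | cons a t =>
    simp only [pv_fold_eq]
    set s := PySem.List.sorted (a :: t) (fun x => x) false with hs
    have hsne : s ≠ [] := by
      rw [hs]; simp [PySem.List.sorted_eq_nil_iff]
    obtain ⟨m, st, hcons⟩ := List.exists_cons_of_ne_nil hsne
    have hperm : s.Perm (a :: t) := PySem.List.sorted_perm _ _ _
    have hmin_le : ∀ y ∈ (a :: t), m ≤ y := by
      have := PySem.List.key_head_sorted_le (xs := a :: t) (key := fun x => x) (by rw [← hs]; exact hcons)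
      simpa using this
    have hm_mem : m ∈ (a :: t) := hperm.mem_iff.mp (by simp [hcons])
    -- min side
    have hf_mem : (t.foldl min a) ∈ (a :: t) := pv_foldl_min_mem t a
    have hf_le : ∀ y ∈ (a :: t), t.foldl min a ≤ y := by
      intro y hy
      rcases List.mem_cons.mp hy with rfl | hy
      · exact (pv_foldl_min_le t _).1
      · exact (pv_foldl_min_le t _).2 y hy
    have hmin : t.foldl min a = s.headD 0 := by
      rw [hcons]; simp
      exact le_antisymm (hf_le m hm_mem) (hmin_le _ hf_mem)
    -- max side
    have hpw : s.Pairwise (· ≤ ·) := by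
      have := PySem.List.sorted_pairwise (xs := a :: t) (key := fun (x : Int) => x)
      simpa [hs] using this
    have hlast_mem : s.getLastD 0 ∈ (a :: t) := hperm.mem_iff.mp (pv_getLastD_mem s hsne)
    have hlast_ge : ∀ y ∈ (a :: t), y ≤ s.getLastD 0 := by
      intro y hy
      exact pv_pairwise_le_getLastD s hpw y (hperm.mem_iff.mpr hy)
    have hg_mem : (t.foldl max a) ∈ (a :: t) := pv_foldl_max_mem t a
    have hg_ge : ∀ y ∈ (a :: t), y ≤ t.foldl max a := by
      intro y hy
      rcases List.mem_cons.mp hy with rfl | hy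
      · exact (pv_foldl_max_ge t _).1
      · exact (pv_foldl_max_ge t _).2 y hy
    have hmax : t.foldl max a = s.getLastD 0 := le_antisymm (hlast_ge _ hg_mem) (hg_ge _ hlast_mem)
    simp only [List.foldl_cons, min_self, max_self]
    rw [hmin, hmax]
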